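-- pv_equiv track=rewrite | github.com/krzysztof-turowski/programming-contests | facebook-hacker-cup/2011-round-1b/chess_2.py | solve
-- ===== SOURCE A (Python) =====
-- import itertools
--
-- N = [(-2, -1), (-2, 1), (-1, -2), (-1, 2), (1, -2), (1, 2), (2, -1), (2, 1)]
--
-- R = [(-1, 0), (0, -1), (0, 1), (1, 0)]
--
-- B = [(-1, -1), (-1, 1), (1, -1), (1, 1)]
--
-- def contains(p):
--     return all(1 <= v <= 16 for v in p)
--
-- def add(p, shift, multiply = 1):
--     return tuple(u + v * multiply for u, v in zip(p, shift))
--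
-- def check_once(position, moves, X):
--     out = set()
--     for shift in moves:
--         other = add(position, shift)
--         if contains(other) and other in X:
--             out.add(other)
--     return out
--
-- def check_line(position, moves, X):
--     out = set()
--     for shift in moves:
--         for i in itertools.count(start = 1):
--             other = add(position, shift, i)
--             if not contains(other):
--                 break
--             if other in X:
--                 out.add(other)
--                 break
--     return out
--
-- def solve(X):
--     out = set()
--     for position, figure in X.items():
--         if figure == 'K':
--             out |= check_once(position, R + B, X)
--         if figure in ('R', 'Q'):
--             out |= check_line(position, R, X)
--         if figure in ('B', 'Q', 'A'):
--             out |= check_line(position, B, X)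
--         if figure in ('N', 'A'):
--             out |= check_once(position, N, X)
--         if figure == 'S':
--             out |= check_line(position, N, X)
--         if figure == 'E':
--             for other in X:
--                 if position != other:
--                     out.add(other)
--     return len(out)
-- ===== SOURCE B (Python) =====
-- def solve(X):
--     KN = [(-2, -1), (-2, 1), (-1, -2), (-1, 2), (1, -2), (1, 2), (2, -1), (2, 1)]
--
--     def contains(p):
--         return 1 <= p[0] <= 16 and 1 <= p[1] <= 16
--
--     def sgn(v):
--         return (v > 0) - (v < 0)
--
--     def clear_path(p, s, k):
--         # squares strictly between p and p + k*s are unoccupied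
--         return all((p[0] + j * s[0], p[1] + j * s[1]) not in X for j in range(1, k))
--
--     def hits(p, f, t):
--         # does the figure f standing at p attack square t?
--         dr, dc = t[0] - p[0], t[1] - p[1]
--         if f == 'E':
--             return (dr, dc) != (0, 0)
--         if (dr, dc) == (0, 0) or not contains(t):
--             return False
--         if f == 'K':
--             return abs(dr) <= 1 and abs(dc) <= 1
--         if f in ('N', 'A') and (dr, dc) in KN:
--             return True
--         a, b = abs(dr), abs(dc)
--         if f in ('R', 'Q') and (dr == 0 or dc == 0):
--             s = (sgn(dr), sgn(dc))
--             return contains((p[0] + s[0], p[1] + s[1])) and clear_path(p, s, max(a, b))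
--         if f in ('B', 'Q', 'A') and a == b:
--             s = (sgn(dr), sgn(dc))
--             return contains((p[0] + s[0], p[1] + s[1])) and clear_path(p, s, a)
--         if f == 'S' and min(a, b) >= 1 and max(a, b) == 2 * min(a, b):
--             k = min(a, b)
--             s = (dr // k, dc // k)
--             return contains((p[0] + s[0], p[1] + s[1])) and clear_path(p, s, k)
--         return False
--
--     return sum(1 for t in X if any(hits(p, f, t) for p, f in X.items()))
-- ===== Notes on version B (the rewrite author's own statement) =====
-- stated objective: alternative
-- what changed: B inverts the scan: instead of A's attacker-centric ray walks accumulating a set of attacked squares, B counts the occupied squares t that some piece attacks, decoding the offset t - p arithmetically (sign/stride and divisibility for rook/bishop/knight lines, with an explicit strictly-between blocking scan) so no ray walking or set union is performed.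
import Mathlib
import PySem

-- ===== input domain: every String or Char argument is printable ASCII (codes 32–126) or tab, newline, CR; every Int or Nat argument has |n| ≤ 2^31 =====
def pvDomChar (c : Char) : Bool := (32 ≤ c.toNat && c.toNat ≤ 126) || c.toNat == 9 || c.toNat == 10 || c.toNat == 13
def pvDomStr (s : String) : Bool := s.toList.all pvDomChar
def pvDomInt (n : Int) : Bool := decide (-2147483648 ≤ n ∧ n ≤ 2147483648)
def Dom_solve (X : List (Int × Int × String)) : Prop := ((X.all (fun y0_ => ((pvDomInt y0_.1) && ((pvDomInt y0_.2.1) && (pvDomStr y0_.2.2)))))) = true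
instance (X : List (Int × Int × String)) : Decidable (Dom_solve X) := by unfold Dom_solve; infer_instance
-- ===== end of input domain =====

-- B re-implements the count from the victim's side: instead of A's walk along each ray from every
-- attacker collecting a set, B counts the occupied squares t for which some piece's move geometry
-- (decoded arithmetically from the offset t - p, with a blocking scan of the strictly-between squares)
-- reaches t.  Alternative decomposition, similar cost; equivalence proved on boards with distinct keys.

-- ===== PORT A =====
def pvNlist : List (Int × Int) := [(-2, -1), (-2, 1), (-1, -2), (-1, 2), (1, -2), (1, 2), (2, -1), (2, 1)]
def pvRlist : List (Int × Int) := [(-1, 0), (0, -1), (0, 1), (1, 0)]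
def pvBlist : List (Int × Int) := [(-1, -1), (-1, 1), (1, -1), (1, 1)]

def pvContains (p : Int × Int) : Bool := (1 ≤ p.1 && p.1 ≤ 16) && (1 ≤ p.2 && p.2 ≤ 16)

def pvAdd (p shift : Int × Int) (multiply : Int) : Int × Int :=
  (p.1 + shift.1 * multiply, p.2 + shift.2 * multiply)

-- 'other in X' : dict-key membership
def pvInX (X : List (Int × Int × String)) (q : Int × Int) : Bool := X.any (fun e => (e.1, e.2.1) == q)

def pvCheckOnce (position : Int × Int) (moves : List (Int × Int)) (X : List (Int × Int × String)) :
    PySem.Set (Int × Int) :=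
  moves.foldl (fun out shift =>
    let other := pvAdd position shift 1
    if pvContains other && pvInX X other then PySem.Set.add out other else out) PySem.Set.empty

-- the 'for i in itertools.count(start=1)' walk; fuel 18 over-approximates the iteration count:
-- the loop body runs again only while the square is on the 16×16 board, at most 16 consecutive i
def pvWalk (X : List (Int × Int × String)) (position shift : Int × Int) : Nat → Int → Option (Int × Int)
  | 0, _ => none
  | fuel + 1, i =>
    let other := pvAdd position shift i
    if !pvContains other then none
    else if pvInX X other then some other
    else pvWalk X position shift fuel (i + 1)

def pvCheckLine (position : Int × Int) (moves : List (Int × Int)) (X : List (Int × Int × String)) :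
    PySem.Set (Int × Int) :=
  moves.foldl (fun out shift =>
    match pvWalk X position shift 18 1 with
    | some other => PySem.Set.add out other
    | none => out) PySem.Set.empty

-- the body of A's 'for position, figure in X.items()' loop
def pvStep (X : List (Int × Int × String)) (out : PySem.Set (Int × Int)) (e : Int × Int × String) :
    PySem.Set (Int × Int) :=
  let position := (e.1, e.2.1)
  let figure := e.2.2
  let out1 := if figure == "K" then PySem.Set.union out (pvCheckOnce position (pvRlist ++ pvBlist) X) else out
  let out2 := if figure == "R" || figure == "Q" then PySem.Set.union out1 (pvCheckLine position pvRlist X) else out1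
  let out3 := if figure == "B" || figure == "Q" || figure == "A" then PySem.Set.union out2 (pvCheckLine position pvBlist X) else out2
  let out4 := if figure == "N" || figure == "A" then PySem.Set.union out3 (pvCheckOnce position pvNlist X) else out3
  let out5 := if figure == "S" then PySem.Set.union out4 (pvCheckLine position pvNlist X) else out4
  if figure == "E" then
    X.foldl (fun o e2 => if position ≠ (e2.1, e2.2.1) then PySem.Set.add o (e2.1, e2.2.1) else o) out5
  else out5

def solve (X : List (Int × Int × String)) : Int :=
  ((X.foldl (pvStep X) PySem.Set.empty).length : Int)

-- ===== PORT B =====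
def pvKN : List (Int × Int) := [(-2, -1), (-2, 1), (-1, -2), (-1, 2), (1, -2), (1, 2), (2, -1), (2, 1)]

def pvContainsB (p : Int × Int) : Bool := (1 ≤ p.1 && p.1 ≤ 16) && (1 ≤ p.2 && p.2 ≤ 16)

def pvSgn (v : Int) : Int := (if 0 < v then 1 else 0) - (if v < 0 then 1 else 0)

def pvOcc (X : List (Int × Int × String)) (q : Int × Int) : Bool := X.any (fun e => (e.1, e.2.1) == q)

-- squares strictly between p and p + k*s are unoccupied
def pvClearPath (X : List (Int × Int × String)) (p s : Int × Int) (k : Int) : Bool :=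
  (PySem.List.pyRange 1 k 1).all (fun j => !pvOcc X (p.1 + j * s.1, p.2 + j * s.2))

-- does the figure f standing at p attack square t?
def pvHits (X : List (Int × Int × String)) (p : Int × Int) (f : String) (t : Int × Int) : Bool :=
  let dr := t.1 - p.1
  let dc := t.2 - p.2
  if f == "E" then !((dr, dc) == ((0 : Int), (0 : Int)))
  else if (dr, dc) == ((0 : Int), (0 : Int)) || !pvContainsB t then false
  else if f == "K" then decide (dr.natAbs ≤ 1) && decide (dc.natAbs ≤ 1)
  else if (f == "N" || f == "A") && pvKN.contains (dr, dc) then true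
  else
    let a : Int := (dr.natAbs : Int)
    let b : Int := (dc.natAbs : Int)
    if (f == "R" || f == "Q") && (dr == 0 || dc == 0) then
      let s := (pvSgn dr, pvSgn dc)
      pvContainsB (p.1 + s.1, p.2 + s.2) && pvClearPath X p s (max a b)
    else if (f == "B" || f == "Q" || f == "A") && a == b then
      let s := (pvSgn dr, pvSgn dc)
      pvContainsB (p.1 + s.1, p.2 + s.2) && pvClearPath X p s a
    else if f == "S" && (1 ≤ min a b && max a b == 2 * min a b) then
      let k := min a b
      let s := (PySem.Int.floordiv dr k, PySem.Int.floordiv dc k)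
      pvContainsB (p.1 + s.1, p.2 + s.2) && pvClearPath X p s k
    else false

def solve_alt (X : List (Int × Int × String)) : Int :=
  ((X.countP (fun t => X.any (fun e => pvHits X (e.1, e.2.1) e.2.2 (t.1, t.2.1)))) : Int)

-- ===== PRECONDITION & SPEC =====
-- Pre_ excludes only lists with duplicate positions: A's argument is a Python dict, whose keys are
-- unique — an association list with a repeated key does not denote a well-formed dict value.
def Pre_solve (X : List (Int × Int × String)) : Prop :=
  (X.map (fun e => (e.1, e.2.1))).Nodup
instance (X : List (Int × Int × String)) : Decidable (Pre_solve X) := by unfold Pre_solve; infer_instance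

def pvWitness_solve : (List (Int × Int × String)) := [(1, 1, "K"), (1, 2, "R"), (5, 5, "Q")]

def Spec_solve (X : List (Int × Int × String)) (out : Int) : Prop := out = solve_alt X
instance (X : List (Int × Int × String)) (out : Int) : Decidable (Spec_solve X out) := by unfold Spec_solve; infer_instance

-- ===== CLAIM (what is proved, stated in full; the proofs are below) =====
def Claim_equal_solve : Prop := ∀ (X : List (Int × Int × String)), Dom_solve X → Pre_solve X → Spec_solve X (solve X)

-- ===== LEMMAS AND PROOFS =====

-- keys of the board
def pvKeys (X : List (Int × Int × String)) : List (Int × Int) := X.map (fun e => (e.1, e.2.1))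

lemma pvInX_iff (X : List (Int × Int × String)) (q : Int × Int) :
    pvInX X q = true ↔ q ∈ pvKeys X := by
  simp only [pvInX, pvKeys, List.any_eq_true, beq_iff_eq, List.mem_map]

-- what one iteration of A's outer loop adds
def AddsA (X : List (Int × Int × String)) (p : Int × Int) (f : String) (q : Int × Int) : Prop :=
  (f = "K" ∧ q ∈ pvCheckOnce p (pvRlist ++ pvBlist) X) ∨
  ((f = "R" ∨ f = "Q") ∧ q ∈ pvCheckLine p pvRlist X) ∨
  ((f = "B" ∨ f = "Q" ∨ f = "A") ∧ q ∈ pvCheckLine p pvBlist X) ∨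
  ((f = "N" ∨ f = "A") ∧ q ∈ pvCheckOnce p pvNlist X) ∨
  (f = "S" ∧ q ∈ pvCheckLine p pvNlist X) ∨
  (f = "E" ∧ p ≠ q ∧ q ∈ pvKeys X)


lemma mem_foldl_addKeys (X' : List (Int × Int × String)) (pos : Int × Int)
    (acc : PySem.Set (Int × Int)) (q : Int × Int) :
    q ∈ X'.foldl (fun o e2 => if pos ≠ (e2.1, e2.2.1) then PySem.Set.add o (e2.1, e2.2.1) else o) acc ↔
      q ∈ acc ∨ (pos ≠ q ∧ q ∈ pvKeys X') := by
  induction X' generalizing acc with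
  | nil => simp [pvKeys]
  | cons e t ih =>
    simp only [List.foldl_cons, ih, pvKeys, List.map_cons, List.mem_cons]
    by_cases h : pos = (e.1, e.2.1)
    · rw [if_neg (not_not_intro h)]
      constructor
      · rintro (hq | ⟨hne, hq⟩)
        · exact Or.inl hq
        · exact Or.inr ⟨hne, Or.inr hq⟩
      · rintro (hq | ⟨hne, rfl | hq⟩)
        · exact Or.inl hq
        · exact absurd h hne
        · exact Or.inr ⟨hne, hq⟩
    · rw [if_pos h]
      constructor
      · rintro (hq | ⟨hne, hq⟩)
        · rcases (PySem.Set.mem_add _ _ _).mp hq with hq | rfl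
          · exact Or.inl hq
          · exact Or.inr ⟨h, Or.inl rfl⟩
        · exact Or.inr ⟨hne, Or.inr hq⟩
      · rintro (hq | ⟨hne, rfl | hq⟩)
        · exact Or.inl ((PySem.Set.mem_add _ _ _).mpr (Or.inl hq))
        · exact Or.inl ((PySem.Set.mem_add _ _ _).mpr (Or.inr rfl))
        · exact Or.inr ⟨hne, hq⟩

lemma mem_checkOnce (position : Int × Int) (moves : List (Int × Int))
    (X : List (Int × Int × String)) (q : Int × Int) :
    q ∈ pvCheckOnce position moves X ↔
      ∃ s ∈ moves, q = pvAdd position s 1 ∧ pvContains q = true ∧ pvInX X q = true := by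
  have main : ∀ (ms : List (Int × Int)) (acc : PySem.Set (Int × Int)),
      q ∈ ms.foldl (fun out shift =>
          let other := pvAdd position shift 1
          if pvContains other && pvInX X other then PySem.Set.add out other else out) acc ↔
        q ∈ acc ∨ ∃ s ∈ ms, q = pvAdd position s 1 ∧ pvContains q = true ∧ pvInX X q = true := by
    intro ms
    induction ms with
    | nil => simp
    | cons m t ih =>
      intro acc
      simp only [List.foldl_cons, ih, List.mem_cons]
      by_cases h : (pvContains (pvAdd position m 1) && pvInX X (pvAdd position m 1)) = true
      · rw [if_pos h]
        constructor
        · rintro (hq | ⟨s, hs, hq⟩)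
          · rcases (PySem.Set.mem_add _ _ _).mp hq with hq | rfl
            · exact Or.inl hq
            · refine Or.inr ⟨m, Or.inl rfl, rfl, ?_, ?_⟩ <;> simp_all
          · exact Or.inr ⟨s, Or.inr hs, hq⟩
        · rintro (hq | ⟨s, rfl | hs, hq⟩)
          · exact Or.inl ((PySem.Set.mem_add _ _ _).mpr (Or.inl hq))
          · exact Or.inl ((PySem.Set.mem_add _ _ _).mpr (Or.inr hq.1))
          · exact Or.inr ⟨s, hs, hq⟩
      · rw [if_neg h]
        constructor
        · rintro (hq | ⟨s, hs, hq⟩)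
          · exact Or.inl hq
          · exact Or.inr ⟨s, Or.inr hs, hq⟩
        · rintro (hq | ⟨s, rfl | hs, hq⟩)
          · exact Or.inl hq
          · exact absurd (by simp [← hq.1, hq.2.1, hq.2.2]) h
          · exact Or.inr ⟨s, hs, hq⟩
  unfold pvCheckOnce
  rw [main moves PySem.Set.empty]
  simp

lemma mem_checkLine (position : Int × Int) (moves : List (Int × Int))
    (X : List (Int × Int × String)) (q : Int × Int) :
    q ∈ pvCheckLine position moves X ↔ ∃ s ∈ moves, pvWalk X position s 18 1 = some q := by
  have main : ∀ (ms : List (Int × Int)) (acc : PySem.Set (Int × Int)),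
      q ∈ ms.foldl (fun out shift =>
          match pvWalk X position shift 18 1 with
          | some other => PySem.Set.add out other
          | none => out) acc ↔
        q ∈ acc ∨ ∃ s ∈ ms, pvWalk X position s 18 1 = some q := by
    intro ms
    induction ms with
    | nil => simp
    | cons m t ih =>
      intro acc
      simp only [List.foldl_cons, ih, List.mem_cons]
      rcases hw : pvWalk X position m 18 1 with _ | o
      · constructor
        · rintro (hq | ⟨s, hs, hq⟩)
          · exact Or.inl hq
          · exact Or.inr ⟨s, Or.inr hs, hq⟩
        · rintro (hq | ⟨s, rfl | hs, hq⟩)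
          · exact Or.inl hq
          · exact absurd (hw.symm.trans hq) (by simp)
          · exact Or.inr ⟨s, hs, hq⟩
      · constructor
        · rintro (hq | ⟨s, hs, hq⟩)
          · rcases (PySem.Set.mem_add _ _ _).mp hq with hq | rfl
            · exact Or.inl hq
            · exact Or.inr ⟨m, Or.inl rfl, hw⟩
          · exact Or.inr ⟨s, Or.inr hs, hq⟩
        · rintro (hq | ⟨s, rfl | hs, hq⟩)
          · exact Or.inl ((PySem.Set.mem_add _ _ _).mpr (Or.inl hq))
          · exact Or.inl ((PySem.Set.mem_add _ _ _).mpr (Or.inr (by simpa using (hw.symm.trans hq).symm)))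
          · exact Or.inr ⟨s, hs, hq⟩
  unfold pvCheckLine
  rw [main moves PySem.Set.empty]
  simp

set_option maxHeartbeats 1000000 in
lemma mem_step (X : List (Int × Int × String)) (out : PySem.Set (Int × Int))
    (e : Int × Int × String) (q : Int × Int) :
    q ∈ pvStep X out e ↔ q ∈ out ∨ AddsA X (e.1, e.2.1) e.2.2 q := by
  obtain ⟨r, c, f⟩ := e
  simp only [pvStep, AddsA]
  split_ifs with h1 h2 h3 h4 h5 h6 <;>
    (try rw [mem_foldl_addKeys]) <;>
    simp_all [PySem.Set.mem_union] <;> tauto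

lemma mem_foldl_step (X X' : List (Int × Int × String)) (acc : PySem.Set (Int × Int)) (q : Int × Int) :
    q ∈ X'.foldl (pvStep X) acc ↔ q ∈ acc ∨ ∃ e ∈ X', AddsA X (e.1, e.2.1) e.2.2 q := by
  induction X' generalizing acc with
  | nil => simp
  | cons e t ih =>
    simp only [List.foldl_cons, ih, mem_step]
    constructor
    · rintro (( h | h) | ⟨e', he', h⟩)
      · exact Or.inl h
      · exact Or.inr ⟨e, by simp, h⟩
      · exact Or.inr ⟨e', by simp [he'], h⟩
    · rintro (h | ⟨e', he', h⟩)
      · exact Or.inl (Or.inl h)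
      · rcases List.mem_cons.mp he' with rfl | he'
        · exact Or.inl (Or.inr h)
        · exact Or.inr ⟨e', he', h⟩

lemma pvAdd_congr (pos s : Int × Int) {a b : Int} (h : a = b) : pvAdd pos s a = pvAdd pos s b := by rw [h]

lemma pvWalk_some_iff (X : List (Int × Int × String)) (pos s : Int × Int)
    (fuel : Nat) (i : Int) (t : Int × Int) :
    pvWalk X pos s fuel i = some t ↔
      ∃ m : Nat, m < fuel ∧ t = pvAdd pos s (i + m) ∧
        (∀ j : Nat, j ≤ m → pvContains (pvAdd pos s (i + j)) = true) ∧
        (∀ j : Nat, j < m → pvInX X (pvAdd pos s (i + j)) = false) ∧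
        pvInX X t = true := by
  induction fuel generalizing i with
  | zero => simp [pvWalk]
  | succ n ih =>
    by_cases hc : pvContains (pvAdd pos s i) = true
    · by_cases hx : pvInX X (pvAdd pos s i) = true
      · simp only [pvWalk, hc, hx, Bool.not_true, if_false, if_true, Bool.false_eq_true,
          Option.some.injEq]
        constructor
        · rintro rfl
          refine ⟨0, by omega, pvAdd_congr _ _ (by push_cast; ring), ?_, ?_, hx⟩
          · intro j hj
            have hj0 : j = 0 := by omega
            subst hj0
            simpa using hc
          · intro j hj; omega
        · rintro ⟨m, hm, ht, hcon, hnx, hxt⟩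
          have hm0 : m = 0 := by
            by_contra hm0
            have h0 := hnx 0 (by omega)
            rw [pvAdd_congr pos s (by push_cast; ring : i + ((0 : Nat) : Int) = i)] at h0
            rw [h0] at hx; exact Bool.false_ne_true hx
          subst hm0
          rw [ht, pvAdd_congr pos s (by push_cast; ring : i + ((0 : Nat) : Int) = i)]
      · simp only [pvWalk, hc, hx, Bool.not_true, if_false, if_true, Bool.false_eq_true]
        rw [ih (i + 1)]
        constructor
        · rintro ⟨m, hm, ht, hcon, hnx, hxt⟩
          refine ⟨m + 1, by omega, ?_, ?_, ?_, hxt⟩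
          · rw [ht]; exact pvAdd_congr _ _ (by push_cast; ring)
          · intro j hj
            rcases Nat.eq_zero_or_pos j with rfl | hj0
            · simpa using hc
            · have := hcon (j - 1) (by omega)
              rw [pvAdd_congr pos s (show (i + 1) + ((j - 1 : Nat) : Int) = i + (j : Nat) by
                push_cast [Nat.cast_sub hj0]; ring)] at this
              exact this
          · intro j hj
            rcases Nat.eq_zero_or_pos j with rfl | hj0
            · simpa using hx
            · have := hnx (j - 1) (by omega)
              rw [pvAdd_congr pos s (show (i + 1) + ((j - 1 : Nat) : Int) = i + (j : Nat) by
                push_cast [Nat.cast_sub hj0]; ring)] at this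
              exact this
        · rintro ⟨m, hm, ht, hcon, hnx, hxt⟩
          have hm0 : m ≠ 0 := by
            rintro rfl
            rw [ht, pvAdd_congr pos s (by push_cast; ring : i + ((0 : Nat) : Int) = i)] at hxt
            exact hx hxt
          refine ⟨m - 1, by omega, ?_, ?_, ?_, hxt⟩
          · rw [ht]; exact pvAdd_congr _ _ (by push_cast [Nat.cast_sub (by omega : 1 ≤ m)]; ring)
          · intro j hj
            have := hcon (j + 1) (by omega)
            rw [pvAdd_congr pos s (show i + ((j + 1 : Nat) : Int) = (i + 1) + (j : Nat) by
              push_cast; ring)] at this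
            exact this
          · intro j hj
            have := hnx (j + 1) (by omega)
            rw [pvAdd_congr pos s (show i + ((j + 1 : Nat) : Int) = (i + 1) + (j : Nat) by
              push_cast; ring)] at this
            exact this
    · simp only [pvWalk, hc, Bool.not_false, if_true, Bool.false_eq_true]
      constructor
      · rintro h; exact absurd h (by simp)
      · rintro ⟨m, hm, ht, hcon, hnx, hxt⟩
        have := hcon 0 (by omega)
        rw [pvAdd_congr pos s (by push_cast; ring : i + ((0 : Nat) : Int) = i)] at this
        exact absurd this hc

def LineReach (X : List (Int × Int × String)) (pos s t : Int × Int) : Prop :=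
  ∃ k : Nat, 1 ≤ k ∧ t = pvAdd pos s (k : Int) ∧
    (∀ j : Nat, 1 ≤ j → j ≤ k → pvContains (pvAdd pos s (j : Int)) = true) ∧
    (∀ j : Nat, 1 ≤ j → j < k → pvInX X (pvAdd pos s (j : Int)) = false) ∧
    pvInX X t = true

lemma walk_k_le (pos s : Int × Int) (k : Int) (hs : s ∈ pvRlist ++ pvBlist ++ pvNlist)
    (h1 : pvContains (pvAdd pos s 1) = true) (hk : pvContains (pvAdd pos s k) = true)
    (hk1 : 1 ≤ k) : k ≤ 16 := by
  have hs' : s ∈ ([(-1, 0), (0, -1), (0, 1), (1, 0), (-1, -1), (-1, 1), (1, -1), (1, 1),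
      (-2, -1), (-2, 1), (-1, -2), (-1, 2), (1, -2), (1, 2), (2, -1), (2, 1)] :
      List (Int × Int)) := by
    simpa [pvRlist, pvBlist, pvNlist] using hs
  fin_cases hs' <;>
    simp only [pvContains, pvAdd, Bool.and_eq_true, decide_eq_true_eq] at h1 hk <;> omega

lemma contains_convex (pos s : Int × Int) (j k : Int) (hs : s ∈ pvRlist ++ pvBlist ++ pvNlist)
    (h1 : pvContains (pvAdd pos s 1) = true) (hk : pvContains (pvAdd pos s k) = true)
    (h1j : 1 ≤ j) (hjk : j ≤ k) : pvContains (pvAdd pos s j) = true := by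
  have hs' : s ∈ ([(-1, 0), (0, -1), (0, 1), (1, 0), (-1, -1), (-1, 1), (1, -1), (1, 1),
      (-2, -1), (-2, 1), (-1, -2), (-1, 2), (1, -2), (1, 2), (2, -1), (2, 1)] :
      List (Int × Int)) := by
    simpa [pvRlist, pvBlist, pvNlist] using hs
  fin_cases hs' <;>
    simp only [pvContains, pvAdd, Bool.and_eq_true, decide_eq_true_eq] at h1 hk ⊢ <;> omega

lemma pvWalk18_iff (X : List (Int × Int × String)) (pos s t : Int × Int)
    (hs : s ∈ pvRlist ++ pvBlist ++ pvNlist) :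
    pvWalk X pos s 18 1 = some t ↔ LineReach X pos s t := by
  rw [pvWalk_some_iff]
  constructor
  · rintro ⟨m, hm, ht, hcon, hnx, hxt⟩
    refine ⟨m + 1, by omega, by rw [ht]; exact pvAdd_congr _ _ (by push_cast; ring), ?_, ?_, hxt⟩
    · intro j h1j hjk
      have := hcon (j - 1) (by omega)
      rw [pvAdd_congr pos s (show (1 : Int) + ((j - 1 : Nat) : Int) = (j : Nat) by
        push_cast [Nat.cast_sub h1j]; ring)] at this
      exact this
    · intro j h1j hjk
      have := hnx (j - 1) (by omega)
      rw [pvAdd_congr pos s (show (1 : Int) + ((j - 1 : Nat) : Int) = (j : Nat) by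
        push_cast [Nat.cast_sub h1j]; ring)] at this
      exact this
  · rintro ⟨k, hk1, ht, hcon, hnx, hxt⟩
    have h1 : pvContains (pvAdd pos s 1) = true := by
      have := hcon 1 (by omega) (by omega)
      rw [pvAdd_congr pos s (by norm_num : ((1 : Nat) : Int) = (1 : Int))] at this
      exact this
    have hkc : pvContains (pvAdd pos s (k : Int)) = true := by
      rw [← ht]; rw [ht] at *; exact hcon k (by omega) le_rfl
    have hk16 : (k : Int) ≤ 16 := walk_k_le pos s k hs h1 hkc (by exact_mod_cast hk1)
    refine ⟨k - 1, by omega, by rw [ht]; exact pvAdd_congr _ _ (by push_cast [Nat.cast_sub hk1]; ring), ?_, ?_, hxt⟩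
    · intro j hj
      have := hcon (j + 1) (by omega) (by omega)
      rw [pvAdd_congr pos s (show ((j + 1 : Nat) : Int) = (1 : Int) + (j : Nat) by push_cast; ring)] at this
      exact this
    · intro j hj
      have := hnx (j + 1) (by omega) (by omega)
      rw [pvAdd_congr pos s (show ((j + 1 : Nat) : Int) = (1 : Int) + (j : Nat) by push_cast; ring)] at this
      exact this

lemma lineReach_iff_endpoints (X : List (Int × Int × String)) (pos s t : Int × Int)
    (hs : s ∈ pvRlist ++ pvBlist ++ pvNlist) :
    LineReach X pos s t ↔
      ∃ k : Nat, 1 ≤ k ∧ t = pvAdd pos s (k : Int) ∧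
        pvContains (pvAdd pos s 1) = true ∧ pvContains t = true ∧
        (∀ j : Nat, 1 ≤ j → j < k → pvInX X (pvAdd pos s (j : Int)) = false) ∧
        pvInX X t = true := by
  constructor
  · rintro ⟨k, hk1, ht, hcon, hnx, hxt⟩
    refine ⟨k, hk1, ht, ?_, ?_, hnx, hxt⟩
    · have := hcon 1 (by omega) (by omega)
      rw [pvAdd_congr pos s (by norm_num : ((1 : Nat) : Int) = (1 : Int))] at this
      exact this
    · rw [ht]; exact hcon k hk1 le_rfl
  · rintro ⟨k, hk1, ht, h1, hkc, hnx, hxt⟩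
    refine ⟨k, hk1, ht, ?_, hnx, hxt⟩
    intro j h1j hjk
    exact contains_convex pos s j k hs h1 (ht ▸ hkc) (by exact_mod_cast h1j) (by exact_mod_cast hjk)

lemma pvOcc_eq (X : List (Int × Int × String)) (q : Int × Int) : pvOcc X q = pvInX X q := rfl

lemma pvContainsB_eq (p : Int × Int) : pvContainsB p = pvContains p := rfl

lemma pvSgn_pos {v : Int} (h : 0 < v) : pvSgn v = 1 := by
  unfold pvSgn; rw [if_pos h, if_neg (by omega)]; norm_num

lemma pvSgn_neg {v : Int} (h : v < 0) : pvSgn v = -1 := by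
  unfold pvSgn; rw [if_neg (by omega), if_pos h]; norm_num

lemma pvSgn_zero : pvSgn 0 = 0 := by norm_num [pvSgn]

lemma fd_cancel (c k : Int) (hk : 0 < k) : PySem.Int.floordiv (c * k) k = c := by
  rw [PySem.Int.floordiv_eq_ediv_of_pos hk]
  exact Int.mul_ediv_cancel c (by omega)

-- same statement with the product left unsimplified, for rewriting
lemma fd_cancel' (c k : Int) (hk : 0 < k) : PySem.Int.floordiv (c * k) k = c := fd_cancel c k hk

lemma clearPath_iff (X : List (Int × Int × String)) (p s : Int × Int) (k : Int) :
    pvClearPath X p s k = true ↔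
      ∀ j : Nat, 1 ≤ j → (j : Int) < k → pvInX X (pvAdd p s (j : Int)) = false := by
  unfold pvClearPath
  rw [List.all_eq_true]
  constructor
  · intro h j hj1 hjk
    have hm := h (j : Int) ((PySem.List.mem_pyRange_one ..).mpr ⟨by exact_mod_cast hj1, hjk⟩)
    rw [pvOcc_eq] at hm
    have : pvInX X (p.1 + (j : Int) * s.1, p.2 + (j : Int) * s.2) = false := by
      simpa using hm
    rw [show pvAdd p s (j : Int) = (p.1 + (j : Int) * s.1, p.2 + (j : Int) * s.2) by
      simp [pvAdd]; constructor <;> ring]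
    exact this
  · intro h x hx
    obtain ⟨hx1, hx2⟩ := (PySem.List.mem_pyRange_one ..).mp hx
    have hcast : ((x.toNat : Int)) = x := by omega
    have := h x.toNat (by omega) (by omega)
    rw [hcast] at this
    rw [show pvAdd p s x = (p.1 + x * s.1, p.2 + x * s.2) by
      simp [pvAdd]; constructor <;> ring] at this
    simp [pvOcc_eq, this]

lemma king_geom (pos t : Int × Int) :
    (∃ s ∈ pvRlist ++ pvBlist, t = pvAdd pos s 1) ↔
      ¬(t.1 - pos.1 = 0 ∧ t.2 - pos.2 = 0) ∧
        (t.1 - pos.1).natAbs ≤ 1 ∧ (t.2 - pos.2).natAbs ≤ 1 := by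
  simp only [pvRlist, pvBlist, pvAdd, List.mem_append, List.mem_cons, List.not_mem_nil,
    or_false, Prod.ext_iff, Prod.mk.injEq]
  constructor
  · rintro ⟨⟨s1, s2⟩, hs, ht1, ht2⟩
    simp only [Prod.mk.injEq] at hs
    rcases hs with (⟨rfl, rfl⟩ | ⟨rfl, rfl⟩ | ⟨rfl, rfl⟩ | ⟨rfl, rfl⟩) |
      (⟨rfl, rfl⟩ | ⟨rfl, rfl⟩ | ⟨rfl, rfl⟩ | ⟨rfl, rfl⟩) <;> simp at ht1 ht2 <;> omega
  · rintro ⟨h0, h1, h2⟩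
    have : (t.1 - pos.1 = -1 ∨ t.1 - pos.1 = 0 ∨ t.1 - pos.1 = 1) ∧
        (t.2 - pos.2 = -1 ∨ t.2 - pos.2 = 0 ∨ t.2 - pos.2 = 1) := by omega
    refine ⟨(t.1 - pos.1, t.2 - pos.2), ?_, by ring_nf, by ring_nf⟩
    simp only [Prod.mk.injEq]
    rcases this with ⟨ha | ha | ha, hb | hb | hb⟩ <;> simp [ha, hb] at h0 ⊢ <;> omega

lemma knight_geom (pos t : Int × Int) :
    (∃ s ∈ pvNlist, t = pvAdd pos s 1) ↔ pvKN.contains (t.1 - pos.1, t.2 - pos.2) = true := by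
  simp only [pvNlist, pvKN, pvAdd, List.contains_eq_mem, List.mem_cons, List.not_mem_nil,
    or_false, Prod.mk.injEq, Prod.ext_iff, decide_eq_true_eq]
  constructor
  · rintro ⟨⟨s1, s2⟩, hs, ht1, ht2⟩
    simp only [Prod.mk.injEq] at hs
    rcases hs with ⟨rfl, rfl⟩ | ⟨rfl, rfl⟩ | ⟨rfl, rfl⟩ | ⟨rfl, rfl⟩ | ⟨rfl, rfl⟩ | ⟨rfl, rfl⟩ |
      ⟨rfl, rfl⟩ | ⟨rfl, rfl⟩ <;> omega
  · intro h
    refine ⟨(t.1 - pos.1, t.2 - pos.2), ?_, by ring_nf, by ring_nf⟩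
    simp only [Prod.mk.injEq]
    omega

lemma rook_fwd (p q s : Int × Int) (k : Nat) (hs : s ∈ pvRlist) (hk : 1 ≤ k)
    (ht : q = pvAdd p s (k : Int)) :
    (pvSgn (q.1 - p.1), pvSgn (q.2 - p.2)) = s ∧
      max ((q.1 - p.1).natAbs : Int) ((q.2 - p.2).natAbs : Int) = (k : Int) ∧
      (q.1 - p.1 = 0 ∨ q.2 - p.2 = 0) ∧ ¬(q.1 - p.1 = 0 ∧ q.2 - p.2 = 0) := by
  have h1 : q.1 - p.1 = s.1 * (k : Int) := by rw [ht]; simp [pvAdd]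
  have h2 : q.2 - p.2 = s.2 * (k : Int) := by rw [ht]; simp [pvAdd]
  rw [h1, h2]
  fin_cases hs <;>
    simp only [Prod.mk.injEq, pvSgn, and_true, true_and] <;> split_ifs <;> omega

lemma rook_bwd (p q : Int × Int) (hax : q.1 - p.1 = 0 ∨ q.2 - p.2 = 0)
    (h0 : ¬(q.1 - p.1 = 0 ∧ q.2 - p.2 = 0)) :
    (pvSgn (q.1 - p.1), pvSgn (q.2 - p.2)) ∈ pvRlist ∧
      1 ≤ max (q.1 - p.1).natAbs (q.2 - p.2).natAbs ∧
      q = pvAdd p (pvSgn (q.1 - p.1), pvSgn (q.2 - p.2))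
        ((max (q.1 - p.1).natAbs (q.2 - p.2).natAbs : Nat) : Int) := by
  obtain ⟨q1, q2⟩ := q
  obtain ⟨p1, p2⟩ := p
  simp only [pvAdd, Prod.mk.injEq] at *
  have hcase : (q1 - p1 < 0 ∧ q2 - p2 = 0) ∨ (0 < q1 - p1 ∧ q2 - p2 = 0) ∨
      (q1 - p1 = 0 ∧ q2 - p2 < 0) ∨ (q1 - p1 = 0 ∧ 0 < q2 - p2) := by omega
  rcases hcase with ⟨h1, h2⟩ | ⟨h1, h2⟩ | ⟨h1, h2⟩ | ⟨h1, h2⟩ <;>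
    [rw [pvSgn_neg h1, show pvSgn (q2 - p2) = 0 by rw [h2]; exact pvSgn_zero];
     rw [pvSgn_pos h1, show pvSgn (q2 - p2) = 0 by rw [h2]; exact pvSgn_zero];
     rw [show pvSgn (q1 - p1) = 0 by rw [h1]; exact pvSgn_zero, pvSgn_neg h2];
     rw [show pvSgn (q1 - p1) = 0 by rw [h1]; exact pvSgn_zero, pvSgn_pos h2]] <;>
    exact ⟨by simp [pvRlist], by omega, by omega, by omega⟩

lemma bishop_fwd (p q s : Int × Int) (k : Nat) (hs : s ∈ pvBlist) (hk : 1 ≤ k)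
    (ht : q = pvAdd p s (k : Int)) :
    (pvSgn (q.1 - p.1), pvSgn (q.2 - p.2)) = s ∧
      ((q.1 - p.1).natAbs : Int) = (k : Int) ∧
      ((q.1 - p.1).natAbs : Int) = ((q.2 - p.2).natAbs : Int) ∧
      ¬(q.1 - p.1 = 0 ∧ q.2 - p.2 = 0) := by
  have h1 : q.1 - p.1 = s.1 * (k : Int) := by rw [ht]; simp [pvAdd]
  have h2 : q.2 - p.2 = s.2 * (k : Int) := by rw [ht]; simp [pvAdd]
  rw [h1, h2]
  fin_cases hs <;>
    simp only [Prod.mk.injEq, pvSgn, and_true, true_and] <;> split_ifs <;> omega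

lemma bishop_bwd (p q : Int × Int) (hab : (q.1 - p.1).natAbs = (q.2 - p.2).natAbs)
    (h0 : ¬(q.1 - p.1 = 0 ∧ q.2 - p.2 = 0)) :
    (pvSgn (q.1 - p.1), pvSgn (q.2 - p.2)) ∈ pvBlist ∧
      1 ≤ (q.1 - p.1).natAbs ∧
      q = pvAdd p (pvSgn (q.1 - p.1), pvSgn (q.2 - p.2)) (((q.1 - p.1).natAbs : Nat) : Int) := by
  obtain ⟨q1, q2⟩ := q
  obtain ⟨p1, p2⟩ := p
  simp only [pvAdd, Prod.mk.injEq] at *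
  have hcase : (q1 - p1 < 0 ∧ q2 - p2 < 0) ∨ (q1 - p1 < 0 ∧ 0 < q2 - p2) ∨
      (0 < q1 - p1 ∧ q2 - p2 < 0) ∨ (0 < q1 - p1 ∧ 0 < q2 - p2) := by omega
  rcases hcase with ⟨h1, h2⟩ | ⟨h1, h2⟩ | ⟨h1, h2⟩ | ⟨h1, h2⟩ <;>
    [rw [pvSgn_neg h1, pvSgn_neg h2]; rw [pvSgn_neg h1, pvSgn_pos h2];
     rw [pvSgn_pos h1, pvSgn_neg h2]; rw [pvSgn_pos h1, pvSgn_pos h2]] <;>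
    exact ⟨by simp [pvBlist], by omega, by omega, by omega⟩

lemma knight_fwd (p q s : Int × Int) (k : Nat) (hs : s ∈ pvNlist) (hk : 1 ≤ k)
    (ht : q = pvAdd p s (k : Int)) :
    (1 ≤ min ((q.1 - p.1).natAbs : Int) ((q.2 - p.2).natAbs : Int) ∧
      max ((q.1 - p.1).natAbs : Int) ((q.2 - p.2).natAbs : Int) =
        2 * min ((q.1 - p.1).natAbs : Int) ((q.2 - p.2).natAbs : Int)) ∧
      min ((q.1 - p.1).natAbs : Int) ((q.2 - p.2).natAbs : Int) = (k : Int) ∧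
      PySem.Int.floordiv (q.1 - p.1) (min ((q.1 - p.1).natAbs : Int) ((q.2 - p.2).natAbs : Int)) = s.1 ∧
      PySem.Int.floordiv (q.2 - p.2) (min ((q.1 - p.1).natAbs : Int) ((q.2 - p.2).natAbs : Int)) = s.2 := by
  have h1 : q.1 - p.1 = s.1 * (k : Int) := by rw [ht]; simp [pvAdd]
  have h2 : q.2 - p.2 = s.2 * (k : Int) := by rw [ht]; simp [pvAdd]
  rw [h1, h2]
  have hmin : min (((s.1 * (k : Int)).natAbs : Int)) (((s.2 * (k : Int)).natAbs : Int)) = (k : Int) := by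
    fin_cases hs <;> simp <;> omega
  rw [hmin]
  refine ⟨?_, rfl, fd_cancel s.1 (k : Int) (by omega), fd_cancel s.2 (k : Int) (by omega)⟩
  fin_cases hs <;> simp <;> omega

lemma knight_bwd (p q : Int × Int)
    (hmin : 1 ≤ min ((q.1 - p.1).natAbs : Int) ((q.2 - p.2).natAbs : Int))
    (hmax : max ((q.1 - p.1).natAbs : Int) ((q.2 - p.2).natAbs : Int) =
      2 * min ((q.1 - p.1).natAbs : Int) ((q.2 - p.2).natAbs : Int)) :
    (PySem.Int.floordiv (q.1 - p.1) (min ((q.1 - p.1).natAbs : Int) ((q.2 - p.2).natAbs : Int)),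
      PySem.Int.floordiv (q.2 - p.2) (min ((q.1 - p.1).natAbs : Int) ((q.2 - p.2).natAbs : Int))) ∈ pvNlist ∧
      1 ≤ (min (q.1 - p.1).natAbs (q.2 - p.2).natAbs : Nat) ∧
      q = pvAdd p
        (PySem.Int.floordiv (q.1 - p.1) (min ((q.1 - p.1).natAbs : Int) ((q.2 - p.2).natAbs : Int)),
          PySem.Int.floordiv (q.2 - p.2) (min ((q.1 - p.1).natAbs : Int) ((q.2 - p.2).natAbs : Int)))
        ((min (q.1 - p.1).natAbs (q.2 - p.2).natAbs : Nat) : Int) := by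
  obtain ⟨q1, q2⟩ := q
  obtain ⟨p1, p2⟩ := p
  simp only [pvAdd, Prod.mk.injEq] at *
  set K : Int := min ((q1 - p1).natAbs : Int) ((q2 - p2).natAbs : Int) with hK
  have hK0 : 0 < K := by omega
  have hKcast : ((min (q1 - p1).natAbs (q2 - p2).natAbs : Nat) : Int) = K := by omega
  have f1 : PySem.Int.floordiv K K = 1 := by simpa using fd_cancel 1 K hK0
  have fm1 : PySem.Int.floordiv (-K) K = -1 := by simpa using fd_cancel (-1) K hK0
  have f2 : PySem.Int.floordiv (2 * K) K = 2 := fd_cancel' 2 K hK0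
  have fm2 : PySem.Int.floordiv (-(2 * K)) K = -2 := by
    have := fd_cancel' (-2) K hK0
    rw [show (-2 : Int) * K = -(2 * K) by ring] at this
    exact this
  have hcase : ((q1 - p1 = K ∨ q1 - p1 = -K) ∧ (q2 - p2 = 2 * K ∨ q2 - p2 = -(2 * K))) ∨
      ((q1 - p1 = 2 * K ∨ q1 - p1 = -(2 * K)) ∧ (q2 - p2 = K ∨ q2 - p2 = -K)) := by omega
  rw [hKcast]
  rcases hcase with ⟨hd1 | hd1, hd2 | hd2⟩ | ⟨hd1 | hd1, hd2 | hd2⟩ <;>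
    rw [hd1, hd2] <;>
    simp only [f1, fm1, f2, fm2] <;>
    exact ⟨by simp [pvNlist], by omega, by omega, by omega⟩


lemma rook_line_iff (X : List (Int × Int × String)) (p q : Int × Int) :
    q ∈ pvCheckLine p pvRlist X ↔
      (q.1 - p.1 = 0 ∨ q.2 - p.2 = 0) ∧ ¬(q.1 - p.1 = 0 ∧ q.2 - p.2 = 0) ∧
        pvContains q = true ∧ pvInX X q = true ∧
        (pvContainsB (p.1 + pvSgn (q.1 - p.1), p.2 + pvSgn (q.2 - p.2)) &&
          pvClearPath X p (pvSgn (q.1 - p.1), pvSgn (q.2 - p.2))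
            (max ((q.1 - p.1).natAbs : Int) ((q.2 - p.2).natAbs : Int))) = true := by
  rw [mem_checkLine]
  constructor
  · rintro ⟨s, hs, hw⟩
    have hdirs : s ∈ pvRlist ++ pvBlist ++ pvNlist := by simp [List.mem_append, hs]
    rw [pvWalk18_iff X p s q hdirs, lineReach_iff_endpoints X p s q hdirs] at hw
    obtain ⟨k, hk1, ht, hc1, hcq, hnx, hxt⟩ := hw
    obtain ⟨hsgn, hmax, hax, h0⟩ := rook_fwd p q s k hs hk1 ht
    refine ⟨hax, h0, hcq, hxt, ?_⟩
    rw [Bool.and_eq_true]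
    refine ⟨?_, ?_⟩
    · rw [pvContainsB_eq, show (p.1 + pvSgn (q.1 - p.1), p.2 + pvSgn (q.2 - p.2)) = pvAdd p s 1 by
        rw [← hsgn]; simp [pvAdd]]
      exact hc1
    · rw [clearPath_iff, hsgn]
      intro j hj1 hjk
      exact hnx j hj1 (by omega)
  · rintro ⟨hax, h0, hcq, hxt, hb⟩
    rw [Bool.and_eq_true] at hb
    obtain ⟨hc1, hcp⟩ := hb
    obtain ⟨hmem, hk1, ht⟩ := rook_bwd p q hax h0
    refine ⟨_, hmem, ?_⟩
    have hdirs : (pvSgn (q.1 - p.1), pvSgn (q.2 - p.2)) ∈ pvRlist ++ pvBlist ++ pvNlist := by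
      exact List.mem_append.mpr (Or.inl (List.mem_append.mpr (Or.inl hmem)))
    rw [pvWalk18_iff X p _ q hdirs, lineReach_iff_endpoints X p _ q hdirs]
    refine ⟨max (q.1 - p.1).natAbs (q.2 - p.2).natAbs, hk1, ht, ?_, hcq, ?_, hxt⟩
    · rw [show pvAdd p (pvSgn (q.1 - p.1), pvSgn (q.2 - p.2)) 1 =
        (p.1 + pvSgn (q.1 - p.1), p.2 + pvSgn (q.2 - p.2)) by simp [pvAdd]]
      rw [pvContainsB_eq] at hc1
      exact hc1
    · intro j hj1 hjk
      exact (clearPath_iff X p _ _).mp hcp j hj1 (by omega)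

lemma bishop_line_iff (X : List (Int × Int × String)) (p q : Int × Int) :
    q ∈ pvCheckLine p pvBlist X ↔
      ((q.1 - p.1).natAbs : Int) = ((q.2 - p.2).natAbs : Int) ∧ ¬(q.1 - p.1 = 0 ∧ q.2 - p.2 = 0) ∧
        pvContains q = true ∧ pvInX X q = true ∧
        (pvContainsB (p.1 + pvSgn (q.1 - p.1), p.2 + pvSgn (q.2 - p.2)) &&
          pvClearPath X p (pvSgn (q.1 - p.1), pvSgn (q.2 - p.2))
            ((q.1 - p.1).natAbs : Int)) = true := by
  rw [mem_checkLine]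
  constructor
  · rintro ⟨s, hs, hw⟩
    have hdirs : s ∈ pvRlist ++ pvBlist ++ pvNlist := by simp [List.mem_append, hs]
    rw [pvWalk18_iff X p s q hdirs, lineReach_iff_endpoints X p s q hdirs] at hw
    obtain ⟨k, hk1, ht, hc1, hcq, hnx, hxt⟩ := hw
    obtain ⟨hsgn, hk, hab, h0⟩ := bishop_fwd p q s k hs hk1 ht
    refine ⟨hab, h0, hcq, hxt, ?_⟩
    rw [Bool.and_eq_true]
    refine ⟨?_, ?_⟩
    · rw [pvContainsB_eq, show (p.1 + pvSgn (q.1 - p.1), p.2 + pvSgn (q.2 - p.2)) = pvAdd p s 1 by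
        rw [← hsgn]; simp [pvAdd]]
      exact hc1
    · rw [clearPath_iff, hsgn]
      intro j hj1 hjk
      exact hnx j hj1 (by omega)
  · rintro ⟨hab, h0, hcq, hxt, hb⟩
    rw [Bool.and_eq_true] at hb
    obtain ⟨hc1, hcp⟩ := hb
    obtain ⟨hmem, hk1, ht⟩ := bishop_bwd p q (by omega) h0
    refine ⟨_, hmem, ?_⟩
    have hdirs : (pvSgn (q.1 - p.1), pvSgn (q.2 - p.2)) ∈ pvRlist ++ pvBlist ++ pvNlist := by
      exact List.mem_append.mpr (Or.inl (List.mem_append.mpr (Or.inr hmem)))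
    rw [pvWalk18_iff X p _ q hdirs, lineReach_iff_endpoints X p _ q hdirs]
    refine ⟨(q.1 - p.1).natAbs, hk1, ht, ?_, hcq, ?_, hxt⟩
    · rw [show pvAdd p (pvSgn (q.1 - p.1), pvSgn (q.2 - p.2)) 1 =
        (p.1 + pvSgn (q.1 - p.1), p.2 + pvSgn (q.2 - p.2)) by simp [pvAdd]]
      rw [pvContainsB_eq] at hc1
      exact hc1
    · intro j hj1 hjk
      exact (clearPath_iff X p _ _).mp hcp j hj1 (by omega)

lemma knight_line_iff (X : List (Int × Int × String)) (p q : Int × Int) :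
    q ∈ pvCheckLine p pvNlist X ↔
      (1 ≤ min ((q.1 - p.1).natAbs : Int) ((q.2 - p.2).natAbs : Int) ∧
        max ((q.1 - p.1).natAbs : Int) ((q.2 - p.2).natAbs : Int) =
          2 * min ((q.1 - p.1).natAbs : Int) ((q.2 - p.2).natAbs : Int)) ∧
        pvContains q = true ∧ pvInX X q = true ∧
        (pvContainsB (p.1 + PySem.Int.floordiv (q.1 - p.1) (min ((q.1 - p.1).natAbs : Int) ((q.2 - p.2).natAbs : Int)),
            p.2 + PySem.Int.floordiv (q.2 - p.2) (min ((q.1 - p.1).natAbs : Int) ((q.2 - p.2).natAbs : Int))) &&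
          pvClearPath X p
            (PySem.Int.floordiv (q.1 - p.1) (min ((q.1 - p.1).natAbs : Int) ((q.2 - p.2).natAbs : Int)),
              PySem.Int.floordiv (q.2 - p.2) (min ((q.1 - p.1).natAbs : Int) ((q.2 - p.2).natAbs : Int)))
            (min ((q.1 - p.1).natAbs : Int) ((q.2 - p.2).natAbs : Int))) = true := by
  rw [mem_checkLine]
  constructor
  · rintro ⟨s, hs, hw⟩
    have hdirs : s ∈ pvRlist ++ pvBlist ++ pvNlist := by simp [List.mem_append, hs]
    rw [pvWalk18_iff X p s q hdirs, lineReach_iff_endpoints X p s q hdirs] at hw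
    obtain ⟨k, hk1, ht, hc1, hcq, hnx, hxt⟩ := hw
    obtain ⟨hcond, hkeq, hf1, hf2⟩ := knight_fwd p q s k hs hk1 ht
    refine ⟨hcond, hcq, hxt, ?_⟩
    rw [Bool.and_eq_true]
    refine ⟨?_, ?_⟩
    · rw [pvContainsB_eq, hf1, hf2, show (p.1 + s.1, p.2 + s.2) = pvAdd p s 1 by simp [pvAdd]]
      exact hc1
    · rw [clearPath_iff, hf1, hf2]
      intro j hj1 hjk
      exact hnx j hj1 (by omega)
  · rintro ⟨⟨hmin, hmax⟩, hcq, hxt, hb⟩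
    rw [Bool.and_eq_true] at hb
    obtain ⟨hc1, hcp⟩ := hb
    obtain ⟨hmem, hk1, ht⟩ := knight_bwd p q hmin hmax
    refine ⟨_, hmem, ?_⟩
    have hdirs : (PySem.Int.floordiv (q.1 - p.1) (min ((q.1 - p.1).natAbs : Int) ((q.2 - p.2).natAbs : Int)),
        PySem.Int.floordiv (q.2 - p.2) (min ((q.1 - p.1).natAbs : Int) ((q.2 - p.2).natAbs : Int))) ∈
        pvRlist ++ pvBlist ++ pvNlist := by
      exact List.mem_append.mpr (Or.inr hmem)
    rw [pvWalk18_iff X p _ q hdirs, lineReach_iff_endpoints X p _ q hdirs]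
    refine ⟨min (q.1 - p.1).natAbs (q.2 - p.2).natAbs, hk1, ht, ?_, hcq, ?_, hxt⟩
    · rw [show pvAdd (p : Int × Int)
        (PySem.Int.floordiv (q.1 - p.1) (min ((q.1 - p.1).natAbs : Int) ((q.2 - p.2).natAbs : Int)),
          PySem.Int.floordiv (q.2 - p.2) (min ((q.1 - p.1).natAbs : Int) ((q.2 - p.2).natAbs : Int))) 1 =
        (p.1 + PySem.Int.floordiv (q.1 - p.1) (min ((q.1 - p.1).natAbs : Int) ((q.2 - p.2).natAbs : Int)),
          p.2 + PySem.Int.floordiv (q.2 - p.2) (min ((q.1 - p.1).natAbs : Int) ((q.2 - p.2).natAbs : Int)))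
        by simp [pvAdd]]
      rw [pvContainsB_eq] at hc1
      exact hc1
    · intro j hj1 hjk
      exact (clearPath_iff X p _ _).mp hcp j hj1 (by omega)

lemma king_once_iff (X : List (Int × Int × String)) (p q : Int × Int) :
    q ∈ pvCheckOnce p (pvRlist ++ pvBlist) X ↔
      (¬(q.1 - p.1 = 0 ∧ q.2 - p.2 = 0) ∧ (q.1 - p.1).natAbs ≤ 1 ∧ (q.2 - p.2).natAbs ≤ 1) ∧
        pvContains q = true ∧ pvInX X q = true := by
  rw [mem_checkOnce]
  constructor
  · rintro ⟨s, hs, ht, hc, hx⟩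
    exact ⟨(king_geom p q).mp ⟨s, hs, ht⟩, hc, hx⟩
  · rintro ⟨hg, hc, hx⟩
    obtain ⟨s, hs, ht⟩ := (king_geom p q).mpr hg
    exact ⟨s, hs, ht, hc, hx⟩

lemma knight_once_iff (X : List (Int × Int × String)) (p q : Int × Int) :
    q ∈ pvCheckOnce p pvNlist X ↔
      pvKN.contains (q.1 - p.1, q.2 - p.2) = true ∧ pvContains q = true ∧ pvInX X q = true := by
  rw [mem_checkOnce]
  constructor
  · rintro ⟨s, hs, ht, hc, hx⟩
    exact ⟨(knight_geom p q).mp ⟨s, hs, ht⟩, hc, hx⟩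
  · rintro ⟨hg, hc, hx⟩
    obtain ⟨s, hs, ht⟩ := (knight_geom p q).mpr hg
    exact ⟨s, hs, ht, hc, hx⟩

set_option maxHeartbeats 1000000 in
lemma adds_iff_hits (X : List (Int × Int × String)) (p q : Int × Int) (f : String)
    (hq : pvInX X q = true) :
    AddsA X p f q ↔ pvHits X p f q = true := by
  have hq' : q ∈ pvKeys X := (pvInX_iff X q).mp hq
  by_cases hE : f = "E"
  · subst hE
    simp [pvHits, AddsA, hq', Prod.ext_iff, ne_eq]
    omega
  · have hfE : (f == "E") = false := by simp [hE]
    by_cases h0 : q.1 - p.1 = 0 ∧ q.2 - p.2 = 0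
    · have hd : ((q.1 - p.1, q.2 - p.2) == ((0 : Int), (0 : Int))) = true := by
        simp [Prod.ext_iff, h0.1, h0.2]
      have hhits : pvHits X p f q = false := by simp [pvHits, hfE, hd]
      rw [hhits]
      simp only [Bool.false_eq_true, iff_false]
      rintro (⟨_, hm⟩ | ⟨_, hm⟩ | ⟨_, hm⟩ | ⟨_, hm⟩ | ⟨_, hm⟩ | ⟨hf, _⟩)
      · exact ((king_once_iff X p q).mp hm).1.1 h0
      · exact ((rook_line_iff X p q).mp hm).2.1 h0
      · exact ((bishop_line_iff X p q).mp hm).2.1 h0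
      · have := ((knight_once_iff X p q).mp hm).1
        rw [h0.1, h0.2] at this
        exact absurd this (by decide)
      · have := ((knight_line_iff X p q).mp hm).1.1
        rw [h0.1, h0.2] at this
        simp at this
      · exact hE hf
    · have hd : ((q.1 - p.1, q.2 - p.2) == ((0 : Int), (0 : Int))) = false := by
        have hne : ¬((q.1 - p.1, q.2 - p.2) = ((0 : Int), (0 : Int))) := by
          simp only [Prod.mk.injEq]
          tauto
        simpa using hne
      by_cases hcq : pvContains q = true
      · -- main case: the board square q is on the board and occupied
        by_cases hK : f = "K"
        · subst hK
          simp only [AddsA, king_once_iff]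
          simp [pvHits, hfE, hd, pvContainsB_eq, hcq, hq, h0]
        · by_cases hN : f = "N"
          · subst hN
            simp only [AddsA, knight_once_iff]
            by_cases hKN : pvKN.contains (q.1 - p.1, q.2 - p.2) = true
            · simp [pvHits, hd, pvContainsB_eq, hcq, hq, hKN]
            · simp [pvHits, hd, pvContainsB_eq, hcq, hq, hKN]
          · by_cases hA : f = "A"
            · subst hA
              simp only [AddsA, knight_once_iff, bishop_line_iff]
              by_cases hKN : pvKN.contains (q.1 - p.1, q.2 - p.2) = true
              · simp [pvHits, hd, pvContainsB_eq, hcq, hq, hKN]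
                tauto
              · simp [pvHits, hd, pvContainsB_eq, hcq, hq, hKN, h0]
                tauto
            · by_cases hR : f = "R"
              · subst hR
                simp only [AddsA, rook_line_iff]
                by_cases hax : (q.1 - p.1 = 0 ∨ q.2 - p.2 = 0)
                · simp [pvHits, hd, pvContainsB_eq, hcq, hq, hax, h0, beq_iff_eq]
                · simp [pvHits, hd, pvContainsB_eq, hcq, hq, hax, h0, beq_iff_eq]
              · by_cases hQ : f = "Q"
                · subst hQ
                  simp only [AddsA, rook_line_iff, bishop_line_iff]
                  by_cases hax : (q.1 - p.1 = 0 ∨ q.2 - p.2 = 0)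
                  · simp [pvHits, hd, pvContainsB_eq, hcq, hq, hax, h0, beq_iff_eq]
                    intro hab hc hcp
                    rw [hab] at hcp
                    rw [hab, max_self]
                    exact ⟨hc, hcp⟩
                  · by_cases hab : ((q.1 - p.1).natAbs : Int) = ((q.2 - p.2).natAbs : Int)
                    · simp [pvHits, hd, pvContainsB_eq, hcq, hq, hax, h0, hab, beq_iff_eq]
                    · simp [pvHits, hd, pvContainsB_eq, hcq, hq, hax, h0, hab, beq_iff_eq]
                · by_cases hB : f = "B"
                  · subst hB
                    simp only [AddsA, bishop_line_iff]
                    by_cases hab : ((q.1 - p.1).natAbs : Int) = ((q.2 - p.2).natAbs : Int)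
                    · simp [pvHits, hd, pvContainsB_eq, hcq, hq, hab, h0, beq_iff_eq]
                    · simp [pvHits, hd, pvContainsB_eq, hcq, hq, hab, h0, beq_iff_eq]
                  · by_cases hS : f = "S"
                    · subst hS
                      simp only [AddsA, knight_line_iff]
                      by_cases hkn : 1 ≤ min ((q.1 - p.1).natAbs : Int) ((q.2 - p.2).natAbs : Int) ∧
                          max ((q.1 - p.1).natAbs : Int) ((q.2 - p.2).natAbs : Int) =
                            2 * min ((q.1 - p.1).natAbs : Int) ((q.2 - p.2).natAbs : Int)
                      · simp [pvHits, hd, pvContainsB_eq, hcq, hq, hkn.1, hkn.2, h0, beq_iff_eq]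
                      · constructor
                        · rintro (⟨hf, _⟩ | ⟨hf, _⟩ | ⟨hf, _⟩ | ⟨hf, _⟩ | ⟨_, hm⟩ | ⟨hf, _⟩)
                          · exact absurd hf (by decide)
                          · rcases hf with hf | hf <;> exact absurd hf (by decide)
                          · rcases hf with hf | hf | hf <;> exact absurd hf (by decide)
                          · rcases hf with hf | hf <;> exact absurd hf (by decide)
                          · exact absurd hm.1 hkn
                          · exact absurd hf (by decide)
                        · intro h
                          exfalso
                          have : pvHits X p "S" q = false := by
                            simp [pvHits, hd, pvContainsB_eq, hcq, beq_iff_eq]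
                            simp only [Int.abs_eq_natAbs]
                            intro h1 h2 h3
                            exact absurd ⟨by omega, h3⟩ hkn
                          rw [this] at h
                          exact Bool.false_ne_true h
                    · -- figure attacks nothing
                      have hhits : pvHits X p f q = false := by
                        simp [pvHits, hfE, hd, beq_iff_eq, hK, hN, hA, hR, hQ, hB, hS]
                      rw [hhits]
                      simp only [Bool.false_eq_true, iff_false, AddsA]
                      rintro (⟨hf, _⟩ | ⟨hf, _⟩ | ⟨hf, _⟩ | ⟨hf, _⟩ | ⟨hf, _⟩ | ⟨hf, _⟩) <;>
                        first
                          | exact hK hf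
                          | exact hN hf
                          | exact hA hf
                          | exact hR hf
                          | exact hQ hf
                          | exact hB hf
                          | exact hS hf
                          | exact hE hf
                          | (rcases hf with hf | hf <;>
                              first | exact hR hf | exact hQ hf | exact hB hf | exact hA hf | exact hN hf)
                          | (rcases hf with hf | hf | hf <;>
                              first | exact hR hf | exact hQ hf | exact hB hf | exact hA hf | exact hN hf)
      · -- q off the board: every non-E attack requires contains q
        have hhits : pvHits X p f q = false := by
          simp [pvHits, hfE, hd, pvContainsB_eq, hcq]
        rw [hhits]
        simp only [Bool.false_eq_true, iff_false]
        rintro (⟨_, hm⟩ | ⟨_, hm⟩ | ⟨_, hm⟩ | ⟨_, hm⟩ | ⟨_, hm⟩ | ⟨hf, _⟩)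
        · exact hcq ((king_once_iff X p q).mp hm).2.1
        · exact hcq ((rook_line_iff X p q).mp hm).2.2.1
        · exact hcq ((bishop_line_iff X p q).mp hm).2.2.1
        · exact hcq ((knight_once_iff X p q).mp hm).2.1
        · exact hcq ((knight_line_iff X p q).mp hm).2.1
        · exact hE hf

lemma nodup_addKeys (X' X : List (Int × Int × String)) (pos : Int × Int)
    (acc : PySem.Set (Int × Int)) (h : acc.Nodup) :
    (X'.foldl (fun o e2 => if pos ≠ (e2.1, e2.2.1) then PySem.Set.add o (e2.1, e2.2.1) else o) acc).Nodup := by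
  induction X' generalizing acc with
  | nil => exact h
  | cons e t ih =>
    simp only [List.foldl_cons]
    apply ih
    split_ifs with hc
    · exact PySem.Set.nodup_add _ _ h
    · exact h

lemma nodup_step (X : List (Int × Int × String)) (out : PySem.Set (Int × Int))
    (e : Int × Int × String) (h : out.Nodup) : (pvStep X out e).Nodup := by
  simp only [pvStep]
  split_ifs <;>
    first
      | exact h
      | exact PySem.Set.nodup_union _ _ h
      | exact nodup_addKeys X X _ _ h
      | exact nodup_addKeys X X _ _ (PySem.Set.nodup_union _ _ h)
      | apply nodup_addKeys X X _ _
        repeat' apply PySem.Set.nodup_union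
        exact h
      | (repeat' apply PySem.Set.nodup_union) ; exact h

lemma nodup_out (X : List (Int × Int × String)) :
    (X.foldl (pvStep X) PySem.Set.empty).Nodup := by
  have main : ∀ (X' : List (Int × Int × String)) (acc : PySem.Set (Int × Int)),
      acc.Nodup → (X'.foldl (pvStep X) acc).Nodup := by
    intro X'
    induction X' with
    | nil => intro acc h; exact h
    | cons e t ih =>
      intro acc h
      exact ih _ (nodup_step X acc e h)
  exact main X PySem.Set.empty List.nodup_nil

lemma adds_mem_keys (X : List (Int × Int × String)) (p q : Int × Int) (f : String)
    (h : AddsA X p f q) : q ∈ pvKeys X := by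
  rcases h with ⟨_, hm⟩ | ⟨_, hm⟩ | ⟨_, hm⟩ | ⟨_, hm⟩ | ⟨_, hm⟩ | ⟨_, _, hk⟩
  · exact (pvInX_iff X q).mp ((king_once_iff X p q).mp hm).2.2
  · exact (pvInX_iff X q).mp ((rook_line_iff X p q).mp hm).2.2.2.1
  · exact (pvInX_iff X q).mp ((bishop_line_iff X p q).mp hm).2.2.2.1
  · exact (pvInX_iff X q).mp ((knight_once_iff X p q).mp hm).2.2
  · exact (pvInX_iff X q).mp ((knight_line_iff X p q).mp hm).2.2.1
  · exact hk

-- ===== VERDICT (by name: the statement is the Claim_ definition above) =====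
theorem solve_spec : Claim_equal_solve := by
  unfold Claim_equal_solve
  intro X hdom hpre
  unfold Spec_solve solve solve_alt
  have hkeysnd : (pvKeys X).Nodup := hpre
  have hmem : ∀ q, q ∈ X.foldl (pvStep X) PySem.Set.empty ↔
      ∃ e ∈ X, AddsA X (e.1, e.2.1) e.2.2 q := by
    intro q
    rw [mem_foldl_step]
    simp
  have hfilt : ∀ q, q ∈ X.foldl (pvStep X) PySem.Set.empty ↔
      q ∈ (pvKeys X).filter (fun q => X.any (fun e => pvHits X (e.1, e.2.1) e.2.2 q)) := by
    intro q
    rw [hmem, List.mem_filter]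
    constructor
    · rintro ⟨e, he, hA⟩
      have hk : q ∈ pvKeys X := adds_mem_keys X (e.1, e.2.1) q e.2.2 hA
      refine ⟨hk, ?_⟩
      rw [List.any_eq_true]
      exact ⟨e, he, (adds_iff_hits X (e.1, e.2.1) q e.2.2 ((pvInX_iff X q).mpr hk)).mp hA⟩
    · rintro ⟨hk, hPq⟩
      obtain ⟨e, he, hh⟩ := List.any_eq_true.mp hPq
      exact ⟨e, he, (adds_iff_hits X (e.1, e.2.1) q e.2.2 ((pvInX_iff X q).mpr hk)).mpr hh⟩
  have hperm : (X.foldl (pvStep X) PySem.Set.empty).Perm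
      ((pvKeys X).filter (fun q => X.any (fun e => pvHits X (e.1, e.2.1) e.2.2 q))) := by
    rw [List.perm_ext_iff_of_nodup (nodup_out X) (hkeysnd.filter _)]
    exact hfilt
  rw [hperm.length_eq]
  have hcnt : ((pvKeys X).filter (fun q => X.any (fun e => pvHits X (e.1, e.2.1) e.2.2 q))).length =
      X.countP (fun t => X.any (fun e => pvHits X (e.1, e.2.1) e.2.2 (t.1, t.2.1))) := by
    rw [← List.countP_eq_length_filter]
    unfold pvKeys
    rw [List.countP_map]
    rfl
  rw [hcnt]
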